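-- pv_equiv track=rewrite | github.com/NingWang0123/AutoPrunedRetriever | py_files/test_chunk.py | update_the_index
-- ===== SOURCE A (Python) =====
-- def update_the_index(codebook_main, codebook_sub, select_feature):
--     items_needs_merged = codebook_sub[select_feature]   # list of strings
--     items_main = codebook_main[select_feature]          # list of strings
--
--     index_item_sub  = {val: idx for idx, val in enumerate(items_needs_merged)}
--     index_item_main = {val: idx for idx, val in enumerate(items_main)}
--
--     next_idx = len(items_main)
--     new_index_replacement_for_sub = {}
--     new_added_items = []
--
--     for item_sub in items_needs_merged:
--         if item_sub in index_item_main: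
--             new_index_replacement_for_sub[index_item_sub[item_sub]] = index_item_main[item_sub]
--         else:
--             new_index_replacement_for_sub[index_item_sub[item_sub]] = next_idx
--             index_item_main[item_sub] = next_idx
--             new_added_items.append(item_sub)
--             next_idx += 1
--
--     return new_index_replacement_for_sub, index_item_main, new_added_items
-- ===== SOURCE B (Python) =====
-- def update_the_index(codebook_main, codebook_sub, select_feature):
--     items_needs_merged = codebook_sub[select_feature]
--     items_main = codebook_main[select_feature]
--
--     main_set = set(items_main)
--     # distinct sub items absent from main, in first-occurrence order
--     new_added_items = list(dict.fromkeys(v for v in items_needs_merged if v not in main_set))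
--
--     index_item_main = {val: idx for idx, val in enumerate(items_main)}
--     index_item_main.update({val: len(items_main) + i for i, val in enumerate(new_added_items)})
--
--     index_item_sub = {val: idx for idx, val in enumerate(items_needs_merged)}
--     new_index_replacement_for_sub = {idx: index_item_main[val] for val, idx in index_item_sub.items()}
--
--     return new_index_replacement_for_sub, index_item_main, new_added_items
-- ===== Notes on version B (the rewrite author's own statement) =====
-- stated objective: alternative
-- what changed: A merges in one online loop with a mutable next_idx counter that interleaves extending the main index, recording added items and writing the remap; B is counter-free and staged: new items are computed by a set-membership filter plus ordered dedup (dict.fromkeys), their indices are assigned arithmetically by enumerate offset len(items_main), and the remap is a pure comprehension over the distinct sub values.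
import Mathlib
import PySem

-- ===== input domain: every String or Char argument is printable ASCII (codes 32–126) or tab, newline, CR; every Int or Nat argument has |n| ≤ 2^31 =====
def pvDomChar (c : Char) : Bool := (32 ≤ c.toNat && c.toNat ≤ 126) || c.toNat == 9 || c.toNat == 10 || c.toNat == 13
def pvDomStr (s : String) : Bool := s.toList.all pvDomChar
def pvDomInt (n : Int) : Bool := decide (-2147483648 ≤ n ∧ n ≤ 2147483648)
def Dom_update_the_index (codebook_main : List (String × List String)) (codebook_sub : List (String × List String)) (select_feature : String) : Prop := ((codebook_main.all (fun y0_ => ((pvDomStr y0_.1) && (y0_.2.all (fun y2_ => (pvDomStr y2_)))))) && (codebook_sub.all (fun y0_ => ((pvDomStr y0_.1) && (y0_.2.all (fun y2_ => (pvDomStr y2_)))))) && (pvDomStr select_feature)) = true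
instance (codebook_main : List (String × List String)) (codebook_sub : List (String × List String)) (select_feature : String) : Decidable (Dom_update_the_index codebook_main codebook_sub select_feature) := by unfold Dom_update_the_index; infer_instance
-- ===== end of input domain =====

-- B replaces A's single online merge loop (mutable next_idx counter interleaving three updates)
-- by a counter-free staged construction: the new items are set-difference-filter + ordered dedup,
-- their indices are assigned by enumerate arithmetic, and the remap is a pure comprehension over
-- the distinct sub values (objective: alternative; same cost class).

-- ===== PORT A =====
-- A's merge step: state = (new_index_replacement_for_sub, index_item_main, new_added_items, next_idx)
def pvAStep (index_item_sub : PySem.Dict String Int)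
    (st : PySem.Dict Int Int × PySem.Dict String Int × List String × Int) (item : String) :
    PySem.Dict Int Int × PySem.Dict String Int × List String × Int :=
  if st.2.1.contains item then
    (st.1.insert (index_item_sub.getD item 0) (st.2.1.getD item 0), st.2.1, st.2.2.1, st.2.2.2)
  else
    (st.1.insert (index_item_sub.getD item 0) st.2.2.2, st.2.1.insert item st.2.2.2,
     st.2.2.1 ++ [item], st.2.2.2 + 1)

def update_the_index (codebook_main : List (String × List String)) (codebook_sub : List (String × List String)) (select_feature : String) : (List (Int × Int)) × (List (String × Int)) × List String :=
  match (PySem.Dict.mk codebook_sub).get? select_feature, (PySem.Dict.mk codebook_main).get? select_feature with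
  | some items_needs_merged, some items_main =>
    let index_item_sub : PySem.Dict String Int :=
      (PySem.List.enumerate items_needs_merged).foldl (fun d p => d.insert p.2 p.1) PySem.Dict.empty
    let index_item_main : PySem.Dict String Int :=
      (PySem.List.enumerate items_main).foldl (fun d p => d.insert p.2 p.1) PySem.Dict.empty
    -- index_item_sub[item] / index_item_main[item] are always present at their uses; getD 0 is exact there
    let st := items_needs_merged.foldl (pvAStep index_item_sub)
      ((PySem.Dict.empty : PySem.Dict Int Int), index_item_main, ([] : List String), (items_main.length : Int))
    (st.1.items, st.2.1.items, st.2.2.1)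
  | _, _ => ([], [], [])   -- KeyError in Python; excluded by Pre_

-- ===== PORT B =====
def update_the_index_alt (codebook_main : List (String × List String)) (codebook_sub : List (String × List String)) (select_feature : String) : (List (Int × Int)) × (List (String × Int)) × List String :=
  match (PySem.Dict.mk codebook_sub).get? select_feature with
  | none => ([], [], [])   -- KeyError in Python; excluded by Pre_
  | some items_needs_merged =>
  match (PySem.Dict.mk codebook_main).get? select_feature with
  | none => ([], [], [])   -- KeyError in Python; excluded by Pre_
  | some items_main =>
    let main_set : PySem.Set String := PySem.Set.ofList items_main
    -- list(dict.fromkeys(v for v in items_needs_merged if v not in main_set))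
    let new_added_items : List String :=
      PySem.List.dedup (items_needs_merged.filter (fun v => !(PySem.Set.contains main_set v)))
    let index_item_main0 : PySem.Dict String Int :=
      (PySem.List.enumerate items_main).foldl (fun d p => d.insert p.2 p.1) PySem.Dict.empty
    -- index_item_main.update({val: len(items_main) + i for i, val in enumerate(new_added_items)})
    let index_item_main : PySem.Dict String Int :=
      (PySem.List.enumerate new_added_items).foldl
        (fun d p => d.insert p.2 ((items_main.length : Int) + p.1)) index_item_main0
    let index_item_sub : PySem.Dict String Int :=
      (PySem.List.enumerate items_needs_merged).foldl (fun d p => d.insert p.2 p.1) PySem.Dict.empty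
    -- {idx: index_item_main[val] for val, idx in index_item_sub.items()}
    let repl : PySem.Dict Int Int :=
      index_item_sub.items.foldl (fun d p => d.insert p.2 (index_item_main.getD p.1 0)) PySem.Dict.empty
    (repl.items, index_item_main.items, new_added_items)

-- ===== PRECONDITION & SPEC =====
-- Pre_ excludes exactly the inputs on which Python A raises KeyError: select_feature missing from either codebook.
def Pre_update_the_index (codebook_main : List (String × List String)) (codebook_sub : List (String × List String)) (select_feature : String) : Prop :=
  ((PySem.Dict.mk codebook_sub).get? select_feature).isSome ∧ ((PySem.Dict.mk codebook_main).get? select_feature).isSome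
instance (codebook_main : List (String × List String)) (codebook_sub : List (String × List String)) (select_feature : String) : Decidable (Pre_update_the_index codebook_main codebook_sub select_feature) := by unfold Pre_update_the_index; infer_instance
def pvWitness_update_the_index : (List (String × List String)) × (List (String × List String)) × String :=
  ([("f", ["b", "c"])], [("f", ["a", "b", "a"])], "f")
def Spec_update_the_index (codebook_main : List (String × List String)) (codebook_sub : List (String × List String)) (select_feature : String) (out : (List (Int × Int)) × (List (String × Int)) × List String) : Prop := out = update_the_index_alt codebook_main codebook_sub select_feature
instance (codebook_main : List (String × List String)) (codebook_sub : List (String × List String)) (select_feature : String) (out : (List (Int × Int)) × (List (String × Int)) × List String) : Decidable (Spec_update_the_index codebook_main codebook_sub select_feature out) := by unfold Spec_update_the_index; infer_instance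

-- ===== CLAIM (what is proved, stated in full; the proofs are below) =====
def Claim_equal_update_the_index : Prop := ∀ (codebook_main : List (String × List String)) (codebook_sub : List (String × List String)) (select_feature : String), Dom_update_the_index codebook_main codebook_sub select_feature → Pre_update_the_index codebook_main codebook_sub select_feature → Spec_update_the_index codebook_main codebook_sub select_feature (update_the_index codebook_main codebook_sub select_feature)

-- ===== LEMMAS AND PROOFS =====

-- proof-internal model of A's extension effect: state = (index_item_main, new_added_items, next_idx)
def pvBStep (st : PySem.Dict String Int × List String × Int) (v : String) :
    PySem.Dict String Int × List String × Int :=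
  if st.1.contains v then st else (st.1.insert v st.2.2, st.2.1 ++ [v], st.2.2 + 1)

-- projection of A's merged loop onto its last three state components
theorem pvAStep_proj (sub : PySem.Dict String Int) (l : List String) :
    ∀ (repl : PySem.Dict Int Int) (st : PySem.Dict String Int × List String × Int),
    (l.foldl (pvAStep sub) (repl, st)).2 = l.foldl pvBStep st := by
  induction l with
  | nil => intro repl st; rfl
  | cons v l ih =>
    intro repl st
    simp only [List.foldl_cons, pvAStep, pvBStep]
    by_cases h : st.1.contains v <;> simp [h, ih]

-- the index-dict component of the extension loop, as a standalone recursion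
def pvExtD : List String → PySem.Dict String Int → Int → PySem.Dict String Int
  | [], m, _ => m
  | v :: l, m, n => if m.contains v then pvExtD l m n else pvExtD l (m.insert v n) (n + 1)

theorem pvBfold_fst (l : List String) :
    ∀ (st : PySem.Dict String Int × List String × Int),
    (l.foldl pvBStep st).1 = pvExtD l st.1 st.2.2 := by
  induction l with
  | nil => intro st; rfl
  | cons v l ih =>
    intro st
    simp only [List.foldl_cons, pvBStep, pvExtD]
    by_cases h : st.1.contains v <;> simp [h, ih]

-- a key already present keeps its value through the extension
theorem pvExtD_getD_of_contains (l : List String) :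
    ∀ (m : PySem.Dict String Int) (n : Int) (v : String), m.contains v = true →
    (pvExtD l m n).getD v 0 = m.getD v 0 := by
  induction l with
  | nil => intro m n v _; rfl
  | cons w l ih =>
    intro m n v hv
    simp only [pvExtD]
    by_cases hw : m.contains w
    · simp [hw, ih m n v hv]
    · have hne : v ≠ w := fun e => by rw [e] at hv; exact absurd hv (by simp [hw])
      rw [if_neg hw]
      rw [ih _ _ v (by simp [PySem.Dict.contains_insert, hv])]
      exact PySem.Dict.getD_insert_of_ne _ _ _ hne

-- A's replacement dict inserts, at each item, the item's FINAL main index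
theorem pvAfold_repl (sub : PySem.Dict String Int) (l : List String) :
    ∀ (repl : PySem.Dict Int Int) (m : PySem.Dict String Int) (ad : List String) (n : Int),
    (l.foldl (pvAStep sub) (repl, m, ad, n)).1
      = l.foldl (fun d x => d.insert (sub.getD x 0) ((pvExtD l m n).getD x 0)) repl := by
  induction l with
  | nil => intro repl m ad n; rfl
  | cons v l ih =>
    intro repl m ad n
    simp only [List.foldl_cons, pvAStep, pvExtD]
    by_cases h : m.contains v
    · rw [if_pos h, if_pos h]
      have hv : (pvExtD l m n).getD v 0 = m.getD v 0 := pvExtD_getD_of_contains l m n v h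
      rw [hv, ih]
    · rw [if_neg h, if_neg h]
      have hc : (m.insert v n).contains v = true := by simp
      have hv : (pvExtD l (m.insert v n) (n + 1)).getD v 0 = n := by
        rw [pvExtD_getD_of_contains l _ _ v hc, PySem.Dict.getD_eq_get?_getD,
            PySem.Dict.get?_insert_self]
        rfl
      rw [ih]
      simp only [hv]

-- lookups after a fold of inserts whose every relevant insert carries the same value
theorem pv_fold_get?_start {α : Type} (k g : α → Int) (l : List α) :
    ∀ (d : PySem.Dict Int Int) (j w : Int), d.get? j = some w → (∀ x ∈ l, k x = j → g x = w) →
    (l.foldl (fun d x => d.insert (k x) (g x)) d).get? j = some w := by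
  induction l with
  | nil => intro d j w hd _; exact hd
  | cons x l ih =>
    intro d j w hd hall
    simp only [List.foldl_cons]
    by_cases hx : k x = j
    · refine ih _ _ _ ?_ (fun y hy => hall y (List.mem_cons_of_mem _ hy))
      rw [hx, hall x (List.mem_cons_self) hx]
      exact PySem.Dict.get?_insert_self _ _ _
    · refine ih _ _ _ ?_ (fun y hy => hall y (List.mem_cons_of_mem _ hy))
      rw [PySem.Dict.get?_insert_of_ne _ _ (fun e => hx e.symm)]
      exact hd

theorem pv_fold_get?_mem {α : Type} (k g : α → Int) (l : List α) :
    ∀ (d : PySem.Dict Int Int) (v : α), v ∈ l → (∀ x ∈ l, k x = k v → g x = g v) →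
    (l.foldl (fun d x => d.insert (k x) (g x)) d).get? (k v) = some (g v) := by
  induction l with
  | nil => intro d v hv; exact absurd hv (List.not_mem_nil)
  | cons x l ih =>
    intro d v hv hall
    simp only [List.foldl_cons]
    by_cases hvl : v ∈ l
    · exact ih _ v hvl (fun y hy => hall y (List.mem_cons_of_mem _ hy))
    · have hvx : v = x := by
        rcases List.mem_cons.mp hv with h | h
        · exact h
        · exact absurd h hvl
      subst hvx
      refine pv_fold_get?_start k g l _ _ _ ?_ (fun y hy => hall y (List.mem_cons_of_mem _ hy))
      exact PySem.Dict.get?_insert_self _ _ _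

-- re-inserting an existing binding is the identity (keys unique)
theorem pv_insert_of_get?_eq_some {κ ν : Type} [BEq κ] [LawfulBEq κ]
    (d : PySem.Dict κ ν) (key : κ) (v : ν)
    (hnd : d.keys.Nodup) (h : d.get? key = some v) : d.insert key v = d := by
  apply PySem.Dict.ext
  have hc : d.contains key = true := by
    rw [PySem.Dict.contains_eq_isSome_get?, h]; rfl
  rw [PySem.Dict.items_insert_of_contains d v hc]
  have : ∀ p ∈ d.items, (if (p.1 == key) = true then (key, v) else p) = p := by
    intro p hp
    obtain ⟨a, b⟩ := p
    by_cases he : (a == key) = true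
    · have hk : a = key := eq_of_beq he
      subst hk
      have hb : d.get? a = some b := PySem.Dict.get?_of_mem_items d hp hnd
      rw [hb] at h
      simp only [Option.some.injEq] at h
      simp [h]
    · simp [he]
  rw [List.map_congr_left this]
  simp

-- folding duplicate items is folding the distinct items, when the key map is injective
theorem pv_fold_dedup (k g : String → Int) (l : List String) :
    ∀ (d : PySem.Dict Int Int), d.keys.Nodup →
    (∀ x ∈ l, ∀ y ∈ l, k x = k y → x = y) →
    l.foldl (fun d x => d.insert (k x) (g x)) d
      = (PySem.List.dedup l).foldl (fun d x => d.insert (k x) (g x)) d := by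
  induction l using List.reverseRecOn with
  | nil => intro d _ _; rfl
  | append_singleton l x ih =>
    intro d hnd hinj
    have hinj' : ∀ a ∈ l, ∀ b ∈ l, k a = k b → a = b := fun a ha b hb =>
      hinj a (List.mem_append_left _ ha) b (List.mem_append_left _ hb)
    rw [List.foldl_append, PySem.List.dedup_eq_ofList, PySem.Set.ofList_append_singleton,
        PySem.Set.add_eq_ite, ← PySem.List.dedup_eq_ofList]
    by_cases hx : x ∈ PySem.List.dedup l
    · rw [if_pos hx, ← ih d hnd hinj']
      simp only [List.foldl_cons, List.foldl_nil]
      have hxl : x ∈ l := (PySem.List.mem_dedup l x).mp hx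
      refine pv_insert_of_get?_eq_some _ _ _ ?_ ?_
      · exact PySem.Dict.nodup_keys_foldl_insert_key l k (fun _ y => g y) d hnd
      · refine pv_fold_get?_mem k g l d x hxl ?_
        intro y hy hky
        rw [hinj y (List.mem_append_left _ hy) x (List.mem_append_right _ (by simp)) hky]
    · rw [if_neg hx, List.foldl_append, ih d hnd hinj']

-- the value-to-index dict of enumerate: keys are the distinct values in first-occurrence order
theorem pv_idx_keys (l : List String) :
    ((PySem.List.enumerate l).foldl (fun d p => d.insert p.2 p.1)
        (PySem.Dict.empty : PySem.Dict String Int)).keys = PySem.List.dedup l := by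
  rw [PySem.Dict.keys_foldl_insert_key (PySem.List.enumerate l) (fun p => p.2) (fun _ p => p.1)
        PySem.Dict.empty,
      PySem.Dict.keys_empty, PySem.List.map_snd_enumerate, PySem.Set.update_nil_left,
      PySem.List.dedup_eq_ofList]

theorem pv_idx_nodup (l : List String) :
    ((PySem.List.enumerate l).foldl (fun d p => d.insert p.2 p.1)
        (PySem.Dict.empty : PySem.Dict String Int)).keys.Nodup :=
  PySem.Dict.nodup_keys_foldl_insert_key (PySem.List.enumerate l)
    (fun p => p.2) (fun _ p => p.1) PySem.Dict.empty
    (by rw [PySem.Dict.keys_empty]; exact List.nodup_nil)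

-- every stored index points back at its value
theorem pv_idx_get?_mem (ps : List (Int × String)) :
    ∀ (d : PySem.Dict String Int) (x : String) (i : Int),
    (ps.foldl (fun d p => d.insert p.2 p.1) d).get? x = some i → (i, x) ∈ ps ∨ d.get? x = some i := by
  induction ps with
  | nil => intro d x i h; exact Or.inr h
  | cons p ps ih =>
    intro d x i h
    rcases ih _ x i h with hm | hd
    · exact Or.inl (List.mem_cons_of_mem _ hm)
    · by_cases hx : x = p.2
      · subst hx
        rw [PySem.Dict.get?_insert_self] at hd
        obtain rfl : p.1 = i := by simpa using hd
        exact Or.inl (by simp)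
      · rw [PySem.Dict.get?_insert_of_ne _ _ hx] at hd
        exact Or.inr hd

-- distinct values of l get distinct (last-occurrence) indices
theorem pv_idx_inj (l : List String) (x y : String) (hx : x ∈ l) (hy : y ∈ l)
    (h : ((PySem.List.enumerate l).foldl (fun d p => d.insert p.2 p.1)
            (PySem.Dict.empty : PySem.Dict String Int)).getD x 0
       = ((PySem.List.enumerate l).foldl (fun d p => d.insert p.2 p.1)
            (PySem.Dict.empty : PySem.Dict String Int)).getD y 0) : x = y := by
  have hget : ∀ z : String, z ∈ l → ∃ (k : Nat) (hk : k < l.length),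
      ((PySem.List.enumerate l).foldl (fun d p => d.insert p.2 p.1)
          (PySem.Dict.empty : PySem.Dict String Int)).get? z = some (k : Int) ∧ z = l[k] := by
    intro z hz
    have hzk : z ∈ ((PySem.List.enumerate l).foldl (fun d p => d.insert p.2 p.1)
        (PySem.Dict.empty : PySem.Dict String Int)).keys := by
      rw [pv_idx_keys]; exact (PySem.List.mem_dedup l z).mpr hz
    have hne : ((PySem.List.enumerate l).foldl (fun d p => d.insert p.2 p.1)
        (PySem.Dict.empty : PySem.Dict String Int)).get? z ≠ none := by
      intro e
      rw [PySem.Dict.get?_eq_none_iff_not_mem_keys] at e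
      exact e hzk
    obtain ⟨i, hi⟩ := Option.ne_none_iff_exists'.mp hne
    rcases pv_idx_get?_mem (PySem.List.enumerate l) PySem.Dict.empty z i hi with hm | habs
    · rw [PySem.List.mem_enumerate_iff] at hm
      obtain ⟨k, hk, hp⟩ := hm
      obtain ⟨hik, hzk'⟩ := Prod.mk.injEq .. ▸ hp
      refine ⟨k, hk, ?_, hzk'⟩
      rw [hi, hik]; norm_num
    · rw [PySem.Dict.get?_empty] at habs; exact absurd habs (by simp)
  obtain ⟨kx, hkx, hgx, hex⟩ := hget x hx
  obtain ⟨ky, hky, hgy, hey⟩ := hget y hy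
  rw [PySem.Dict.getD_eq_get?_getD, PySem.Dict.getD_eq_get?_getD, hgx, hgy] at h
  have hkk : kx = ky := by simpa using h
  subst hkk
  exact hex.trans hey.symm

-- the replacement dict of A's loop equals the comprehension over the distinct sub values
theorem pv_repl_eq (lsub lmain : List String) :
    (lsub.foldl (pvAStep ((PySem.List.enumerate lsub).foldl (fun d p => d.insert p.2 p.1) PySem.Dict.empty))
        ((PySem.Dict.empty : PySem.Dict Int Int),
         (PySem.List.enumerate lmain).foldl (fun d p => d.insert p.2 p.1) PySem.Dict.empty,
         ([] : List String), (lmain.length : Int))).1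
      = ((PySem.List.enumerate lsub).foldl (fun d p => d.insert p.2 p.1)
            (PySem.Dict.empty : PySem.Dict String Int)).items.foldl
          (fun d p => d.insert p.2
            (((lsub.foldl pvBStep
                ((PySem.List.enumerate lmain).foldl (fun d p => d.insert p.2 p.1) PySem.Dict.empty,
                 ([] : List String), (lmain.length : Int))).1).getD p.1 0))
          PySem.Dict.empty := by
  rw [pvAfold_repl, pvBfold_fst]
  rw [pv_fold_dedup
        (fun x => ((PySem.List.enumerate lsub).foldl (fun d p => d.insert p.2 p.1)
            (PySem.Dict.empty : PySem.Dict String Int)).getD x 0)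
        (fun x => (pvExtD lsub
            ((PySem.List.enumerate lmain).foldl (fun d p => d.insert p.2 p.1) PySem.Dict.empty)
            (lmain.length : Int)).getD x 0)
        lsub PySem.Dict.empty (by rw [PySem.Dict.keys_empty]; exact List.nodup_nil)
        (fun x hx y hy h => pv_idx_inj lsub x y hx hy h)]
  rw [PySem.Dict.items_eq_map_keys _ (pv_idx_nodup lsub) 0, pv_idx_keys, List.foldl_map]

-- ===== lemmas relating the extension loop to B's staged construction =====

-- the new items taken by the extension loop, driven by a membership list 'seen'
def pvNew (seen : List String) : List String → List String
  | [] => []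
  | v :: l => if v ∈ seen then pvNew seen l else v :: pvNew (v :: seen) l

-- consecutive insertions of fresh items starting at index n
def pvIns (m : PySem.Dict String Int) (n : Int) : List String → PySem.Dict String Int
  | [] => m
  | v :: l => pvIns (m.insert v n) (n + 1) l

-- the added-items component of the extension loop is pvNew
theorem pvBfold_added (l : List String) :
    ∀ (m : PySem.Dict String Int) (ad : List String) (n : Int) (seen : List String),
    (∀ v, m.contains v = true ↔ v ∈ seen) →
    (l.foldl pvBStep (m, ad, n)).2.1 = ad ++ pvNew seen l := by
  induction l with
  | nil => intro m ad n seen _; simp [pvNew]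
  | cons v l ih =>
    intro m ad n seen hm
    simp only [List.foldl_cons, pvBStep, pvNew]
    by_cases h : m.contains v
    · rw [if_pos h, if_pos ((hm v).mp h)]; exact ih m ad n seen hm
    · rw [if_neg h, if_neg (fun hc => h ((hm v).mpr hc))]
      rw [ih (m.insert v n) (ad ++ [v]) (n + 1) (v :: seen)
            (by intro w; rw [PySem.Dict.contains_insert]; simp only [Bool.or_eq_true, beq_iff_eq, hm w, List.mem_cons])]
      simp

-- the dict component of the extension loop is pvIns over pvNew
theorem pvExtD_eq_pvIns (l : List String) :
    ∀ (m : PySem.Dict String Int) (n : Int) (seen : List String),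
    (∀ v, m.contains v = true ↔ v ∈ seen) →
    pvExtD l m n = pvIns m n (pvNew seen l) := by
  induction l with
  | nil => intro m n seen _; rfl
  | cons v l ih =>
    intro m n seen hm
    simp only [pvExtD, pvNew]
    by_cases h : m.contains v
    · rw [if_pos h, if_pos ((hm v).mp h)]; exact ih m n seen hm
    · rw [if_neg h, if_neg (fun hc => h ((hm v).mpr hc))]
      show pvExtD l (m.insert v n) (n + 1) = pvIns (m.insert v n) (n + 1) (pvNew (v :: seen) l)
      exact ih (m.insert v n) (n + 1) (v :: seen)
        (by intro w; rw [PySem.Dict.contains_insert]; simp only [Bool.or_eq_true, beq_iff_eq, hm w, List.mem_cons])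

-- filter-then-dedup computes pvNew
theorem pv_foldl_add_filter (l : List String) :
    ∀ (s₀ : PySem.Set String) (acc seen : List String),
    (∀ x, x ∈ seen ↔ x ∈ s₀ ∨ x ∈ acc) →
    List.foldl PySem.Set.add acc (l.filter (fun v => !(PySem.Set.contains s₀ v)))
      = acc ++ pvNew seen l := by
  induction l with
  | nil => intro s₀ acc seen _; simp [pvNew]
  | cons v l ih =>
    intro s₀ acc seen hseen
    simp only [pvNew]
    by_cases h0 : v ∈ s₀
    · have hc : PySem.Set.contains s₀ v = true := (PySem.Set.contains_iff _ _).mpr h0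
      rw [List.filter_cons_of_neg (by rw [hc]; simp), if_pos ((hseen v).mpr (Or.inl h0))]
      exact ih s₀ acc seen hseen
    · have hc : PySem.Set.contains s₀ v = false := by
        rcases Bool.eq_false_or_eq_true (PySem.Set.contains s₀ v) with h | h
        · exact absurd ((PySem.Set.contains_iff _ _).mp h) h0
        · exact h
      rw [List.filter_cons_of_pos (by rw [hc]; rfl), List.foldl_cons]
      by_cases ha : v ∈ acc
      · rw [PySem.Set.add_of_mem ha, if_pos ((hseen v).mpr (Or.inr ha))]
        exact ih s₀ acc seen hseen
      · have hvnot : v ∉ seen := fun hv => Or.elim ((hseen v).mp hv) (fun h => h0 h) (fun h => ha h)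
        rw [PySem.Set.add_of_not_mem ha, if_neg hvnot]
        rw [ih s₀ (acc ++ [v]) (v :: seen)
              (by intro x
                  simp only [List.mem_cons, List.mem_append, hseen x]
                  tauto)]
        simp

theorem pv_dedup_filter_eq_pvNew (l : List String) (lmain : List String) :
    PySem.List.dedup (l.filter (fun v => !(PySem.Set.contains (PySem.Set.ofList lmain) v)))
      = pvNew (PySem.Set.ofList lmain) l := by
  rw [PySem.List.dedup_eq_ofList, PySem.Set.ofList_eq_foldl]
  exact pv_foldl_add_filter l (PySem.Set.ofList lmain) [] (PySem.Set.ofList lmain)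
    (by intro x; simp)

-- appending one item to pvIns
theorem pvIns_snoc (ad : List String) :
    ∀ (m : PySem.Dict String Int) (n : Int) (v : String),
    pvIns m n (ad ++ [v]) = (pvIns m n ad).insert v (n + (ad.length : Int)) := by
  induction ad with
  | nil => intro m n v; simp [pvIns]
  | cons a ad ih =>
    intro m n v
    show pvIns (m.insert a n) (n + 1) (ad ++ [v])
        = (pvIns (m.insert a n) (n + 1) ad).insert v (n + ((a :: ad).length : Int))
    rw [ih]
    congr 1
    simp only [List.length_cons]
    push_cast
    ring

-- the enumerate-update fold of B is pvIns
theorem pv_enum_fold_eq_pvIns (ad : List String) :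
    ∀ (m : PySem.Dict String Int) (n : Int),
    (PySem.List.enumerate ad).foldl (fun d p => d.insert p.2 (n + p.1)) m = pvIns m n ad := by
  induction ad using List.reverseRecOn with
  | nil => intro m n; rfl
  | append_singleton l v ih =>
    intro m n
    rw [PySem.List.enumerate_append, List.foldl_append, ih, pvIns_snoc]
    simp [PySem.List.enumerate]

-- the starting main dict tests membership in items_main
theorem pv_base_contains (lmain : List String) (v : String) :
    ((PySem.List.enumerate lmain).foldl (fun d p => d.insert p.2 p.1)
        (PySem.Dict.empty : PySem.Dict String Int)).contains v = true
      ↔ v ∈ PySem.Set.ofList lmain := by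
  rw [PySem.Dict.contains_iff_mem_keys, pv_idx_keys, PySem.List.dedup_eq_ofList]

theorem update_the_index_spec : Claim_equal_update_the_index := by
  intro codebook_main codebook_sub select_feature _ hpre
  obtain ⟨h1, h2⟩ := hpre
  obtain ⟨lsub, e1⟩ := Option.isSome_iff_exists.mp h1
  obtain ⟨lmain, e2⟩ := Option.isSome_iff_exists.mp h2
  unfold Spec_update_the_index update_the_index update_the_index_alt
  rw [e1, e2]
  dsimp only
  -- names for the shared pieces
  have hnew : PySem.List.dedup (lsub.filter (fun v => !(PySem.Set.contains (PySem.Set.ofList lmain) v)))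
      = pvNew (PySem.Set.ofList lmain) lsub := pv_dedup_filter_eq_pvNew lsub lmain
  have hdict :
      (lsub.foldl pvBStep
          ((PySem.List.enumerate lmain).foldl (fun d p => d.insert p.2 p.1) PySem.Dict.empty,
           ([] : List String), (lmain.length : Int))).1
        = (PySem.List.enumerate (PySem.List.dedup
              (lsub.filter (fun v => !(PySem.Set.contains (PySem.Set.ofList lmain) v))))).foldl
            (fun d p => d.insert p.2 ((lmain.length : Int) + p.1))
            ((PySem.List.enumerate lmain).foldl (fun d p => d.insert p.2 p.1) PySem.Dict.empty) := by
    rw [pvBfold_fst, pv_enum_fold_eq_pvIns, hnew]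
    exact pvExtD_eq_pvIns lsub _ _ (PySem.Set.ofList lmain) (pv_base_contains lmain)
  have hadded :
      (lsub.foldl (pvAStep ((PySem.List.enumerate lsub).foldl (fun d p => d.insert p.2 p.1) PySem.Dict.empty))
          ((PySem.Dict.empty : PySem.Dict Int Int),
           (PySem.List.enumerate lmain).foldl (fun d p => d.insert p.2 p.1) PySem.Dict.empty,
           ([] : List String), (lmain.length : Int))).2
        = lsub.foldl pvBStep
            ((PySem.List.enumerate lmain).foldl (fun d p => d.insert p.2 p.1) PySem.Dict.empty,
             ([] : List String), (lmain.length : Int)) := pvAStep_proj _ lsub _ _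
  simp only [Prod.mk.injEq]
  refine ⟨?_, ?_, ?_⟩
  · rw [pv_repl_eq lsub lmain, hdict]
  · rw [congrArg (fun st => st.1.items) hadded, congrArg PySem.Dict.items hdict]
  · rw [congrArg (fun st => st.2.1) hadded,
        pvBfold_added lsub _ [] _ (PySem.Set.ofList lmain) (pv_base_contains lmain),
        List.nil_append, hnew]
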